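-- pv_equiv track=rewrite | github.com/Sathya112716/python_repo | src/Piling_up/util.py | can_stack_cubes
-- ===== SOURCE A (Python) =====
-- def can_stack_cubes(test_cases):
--     results = []
--     for cubes in test_cases:
--         left = 0
--         right = len(cubes) - 1
--         prev_cube = float('inf')
--
--         while left <= right:
--             if cubes[left] <= cubes[right]:
--                 if cubes[right] <= prev_cube:
--                     prev_cube = cubes[right]
--                     right -= 1
--                 else:
--                     results.append("No")
--                     break
--             else:
--                 if cubes[left] <= prev_cube:
--                     prev_cube = cubes[left]
--                     left += 1
--                 else:
--                     results.append("No")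
--                     break
--         else:
--             results.append("Yes")
--
--     return results
-- ===== SOURCE B (Python) =====
-- def can_stack_cubes(test_cases):
--     # One forward scan per case: "Yes" iff cubes are valley-shaped
--     # (non-increasing prefix followed by a non-decreasing suffix).
--     results = []
--     for cubes in test_cases:
--         n = len(cubes)
--         i = 1
--         while i < n and cubes[i] <= cubes[i - 1]:
--             i += 1
--         while i < n and cubes[i - 1] <= cubes[i]:
--             i += 1
--         results.append("Yes" if i >= n else "No")
--     return results
-- ===== Notes on version B (the rewrite author's own statement) =====
-- stated objective: simpler
-- what changed: Replaces A's two-pointer greedy simulation of removing cubes from both ends (tracking the last stacked cube) with a single forward scan that checks the list is valley-shaped: a non-increasing prefix followed by a non-decreasing suffix.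
import Mathlib
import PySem

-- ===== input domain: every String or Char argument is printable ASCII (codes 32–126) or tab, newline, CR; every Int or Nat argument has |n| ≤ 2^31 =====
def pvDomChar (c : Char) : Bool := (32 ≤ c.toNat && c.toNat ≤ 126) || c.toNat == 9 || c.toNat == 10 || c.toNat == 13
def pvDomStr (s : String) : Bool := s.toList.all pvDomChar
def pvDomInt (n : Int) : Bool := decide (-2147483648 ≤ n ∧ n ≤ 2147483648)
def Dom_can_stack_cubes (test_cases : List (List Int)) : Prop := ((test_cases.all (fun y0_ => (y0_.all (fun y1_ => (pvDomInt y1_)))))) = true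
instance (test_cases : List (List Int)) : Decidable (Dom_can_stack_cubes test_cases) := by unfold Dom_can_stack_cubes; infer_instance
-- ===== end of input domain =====

-- B replaces A's two-pointer end-removal simulation by a single forward scan checking the
-- list is valley-shaped (non-increasing then non-decreasing); same O(n) per case, simpler.

-- ===== PORT A =====
-- prev_cube starts as float('inf'): ported as Option Int, none = infinity (only ever compared with ≤)
def pvLeInf (x : Int) (p : Option Int) : Bool :=
  match p with
  | none => true
  | some v => decide (x ≤ v)

-- the while-loop of A; cubes[left], cubes[right] are in range whenever read (0 ≤ l ≤ r < len)
def pvALoop (cubes : List Int) (l r : Int) (p : Option Int) : String :=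
  if _h : l ≤ r then
    if PySem.List.pyGetD cubes l 0 ≤ PySem.List.pyGetD cubes r 0 then
      if pvLeInf (PySem.List.pyGetD cubes r 0) p then
        pvALoop cubes l (r - 1) (some (PySem.List.pyGetD cubes r 0))
      else "No"
    else
      if pvLeInf (PySem.List.pyGetD cubes l 0) p then
        pvALoop cubes (l + 1) r (some (PySem.List.pyGetD cubes l 0))
      else "No"
  else "Yes"
termination_by (r + 1 - l).toNat
decreasing_by all_goals omega

def can_stack_cubes (test_cases : List (List Int)) : List String :=
  test_cases.foldl
    (fun results cubes => results ++ [pvALoop cubes 0 ((cubes.length : Int) - 1) none]) []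

-- ===== PORT B =====
-- first while-loop of B: advance i while i < n and cubes[i] <= cubes[i-1]
def pvBDesc (cubes : List Int) (n i : Int) : Int :=
  if _h : i < n ∧ PySem.List.pyGetD cubes i 0 ≤ PySem.List.pyGetD cubes (i - 1) 0 then
    pvBDesc cubes n (i + 1)
  else i
termination_by (n - i).toNat
decreasing_by omega

-- second while-loop of B: advance i while i < n and cubes[i-1] <= cubes[i]
def pvBAsc (cubes : List Int) (n i : Int) : Int :=
  if _h : i < n ∧ PySem.List.pyGetD cubes (i - 1) 0 ≤ PySem.List.pyGetD cubes i 0 then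
    pvBAsc cubes n (i + 1)
  else i
termination_by (n - i).toNat
decreasing_by omega

def can_stack_cubes_alt (test_cases : List (List Int)) : List String :=
  test_cases.foldl
    (fun results cubes =>
      let n : Int := cubes.length
      results ++ [if n ≤ pvBAsc cubes n (pvBDesc cubes n 1) then "Yes" else "No"]) []

-- ===== PRECONDITION & SPEC =====
def Spec_can_stack_cubes (test_cases : List (List Int)) (out : List String) : Prop := out = can_stack_cubes_alt test_cases
instance (test_cases : List (List Int)) (out : List String) : Decidable (Spec_can_stack_cubes test_cases out) := by unfold Spec_can_stack_cubes; infer_instance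

-- ===== CLAIM (what is proved, stated in full; the proofs are below) =====
def Claim_equal_can_stack_cubes : Prop := ∀ (test_cases : List (List Int)), Dom_can_stack_cubes test_cases → Spec_can_stack_cubes test_cases (can_stack_cubes test_cases)

-- ===== LEMMAS AND PROOFS =====

-- the segment cubes[a..b] as a list of values (indices a, a+1, …, b)
def pvSeg (cubes : List Int) (a b : Int) : List Int :=
  (PySem.List.pyRange a (b + 1) 1).map (fun j => PySem.List.pyGetD cubes j 0)

abbrev pvNonInc (xs : List Int) : Prop := List.IsChain (fun a b => b ≤ a) xs
abbrev pvNonDec (xs : List Int) : Prop := List.IsChain (fun a b => a ≤ b) xs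

-- valley shape: a non-increasing prefix followed by a non-decreasing suffix
def pvValley (xs : List Int) : Prop :=
  ∃ as bs, xs = as ++ bs ∧ pvNonInc as ∧ pvNonDec bs

-- both ends of xs are ≤ the cap p (none = +infinity)
def pvCapOK (xs : List Int) (p : Option Int) : Prop :=
  ∀ v, p = some v →
    (∀ x, xs.head? = some x → x ≤ v) ∧ (∀ x, xs.getLast? = some x → x ≤ v)

-- structural one-pass scans (pure list versions of B's loops)
def pvNonDecL : List Int → Bool
  | [] => true
  | [_] => true
  | x :: y :: t => decide (x ≤ y) && pvNonDecL (y :: t)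

def pvValleyL : List Int → Bool
  | [] => true
  | [_] => true
  | x :: y :: t => if y ≤ x then pvValleyL (y :: t) else pvNonDecL (x :: y :: t)

-- ---- segment decompositions ----
theorem pvSeg_nil {cubes : List Int} {l r : Int} (h : r < l) : pvSeg cubes l r = [] := by
  unfold pvSeg; rw [PySem.List.pyRange_one_eq_nil (by omega)]; rfl

theorem pvSeg_concat {cubes : List Int} {l r : Int} (h : l ≤ r) :
    pvSeg cubes l r = pvSeg cubes l (r - 1) ++ [PySem.List.pyGetD cubes r 0] := by
  unfold pvSeg
  have h1 : r - 1 + 1 = r := by omega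
  rw [h1, PySem.List.pyRange_one_succ_right h, List.map_append]
  rfl

theorem pvSeg_cons {cubes : List Int} {l r : Int} (h : l ≤ r) :
    pvSeg cubes l r = PySem.List.pyGetD cubes l 0 :: pvSeg cubes (l + 1) r := by
  unfold pvSeg; rw [PySem.List.pyRange_one_cons (by omega : l < r + 1)]; rfl

theorem pvSeg_head? {cubes : List Int} {l r : Int} (h : l ≤ r) :
    (pvSeg cubes l r).head? = some (PySem.List.pyGetD cubes l 0) := by
  rw [pvSeg_cons h]; rfl

theorem pvSeg_getLast? {cubes : List Int} {l r : Int} (h : l ≤ r) :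
    (pvSeg cubes l r).getLast? = some (PySem.List.pyGetD cubes r 0) := by
  rw [pvSeg_concat h]; simp

-- ---- order facts along a chain ----
theorem pv_last_le_head_of_nonInc :
    ∀ {zs : List Int} {x y : Int}, pvNonInc (x :: zs) → (x :: zs).getLast? = some y → y ≤ x := by
  intro zs
  induction zs with
  | nil => intro x y _ h2; simp at h2; omega
  | cons z t ih =>
      intro x y h1 h2
      unfold pvNonInc at h1 ih
      rw [List.isChain_cons] at h1
      have hzx : z ≤ x := h1.1 z rfl
      have : y ≤ z := ih h1.2 (by simpa using h2)
      omega

theorem pv_head_le_last_of_nonDec :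
    ∀ {zs : List Int} {x y : Int}, pvNonDec (x :: zs) → (x :: zs).getLast? = some y → x ≤ y := by
  intro zs
  induction zs with
  | nil => intro x y _ h2; simp at h2; omega
  | cons z t ih =>
      intro x y h1 h2
      unfold pvNonDec at h1 ih
      rw [List.isChain_cons] at h1
      have hxz : x ≤ z := h1.1 z rfl
      have : z ≤ y := ih h1.2 (by simpa using h2)
      omega

-- ---- pure valley facts ----
theorem pvValley_nil : pvValley [] := ⟨[], [], rfl, List.IsChain.nil, List.IsChain.nil⟩

theorem pvValley_of_nonDec {xs : List Int} (h : pvNonDec xs) : pvValley xs :=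
  ⟨[], xs, rfl, List.IsChain.nil, h⟩

theorem pvValley_tail {x : Int} {zs : List Int} (h : pvValley (x :: zs)) : pvValley zs := by
  obtain ⟨as, bs, heq, hni, hnd⟩ := h
  cases as with
  | nil =>
      exact pvValley_of_nonDec (by
        have : bs = x :: zs := by simpa using heq.symm
        subst this; exact hnd.of_cons)
  | cons a as' =>
      rw [List.cons_append] at heq
      injection heq with h1 h2
      exact ⟨as', bs, h2, hni.of_cons, hnd⟩

theorem pvValley_cons_of_le {x y : Int} {t : List Int} (hxy : y ≤ x)
    (h : pvValley (y :: t)) : pvValley (x :: y :: t) := by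
  obtain ⟨as, bs, heq, hni, hnd⟩ := h
  cases as with
  | nil =>
      have hbs : bs = y :: t := by simpa using heq.symm
      subst hbs
      exact ⟨[x], y :: t, rfl, by simp [pvNonInc], hnd⟩
  | cons a as' =>
      rw [List.cons_append] at heq
      injection heq with h1 h2
      subst h1
      refine ⟨x :: y :: as', bs, by simp [h2], ?_, hnd⟩
      unfold pvNonInc at hni ⊢
      rw [List.isChain_cons]
      exact ⟨fun z hz => by simp at hz; omega, hni⟩

-- appending a new largest end (V1)
theorem pvValley_concat_iff {zs : List Int} {b : Int} {p : Option Int}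
    (hhd : ∀ x, zs.head? = some x → x ≤ b) :
    (pvValley (zs ++ [b]) ∧ pvCapOK (zs ++ [b]) p) ↔
      (pvLeInf b p = true ∧ pvValley zs ∧ pvCapOK zs (some b)) := by
  constructor
  · rintro ⟨⟨as, bs, heq, hni, hnd⟩, hcap⟩
    -- zs is a valley and its last element is ≤ b
    have key : pvValley zs ∧ (∀ y, zs.getLast? = some y → y ≤ b) := by
      rcases bs.eq_nil_or_concat' with rfl | ⟨bs', c, rfl⟩
      · -- the whole list is non-increasing
        rw [List.append_nil] at heq
        rw [← heq] at hni
        have hzs : pvNonInc zs := (List.isChain_append.mp hni).1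
        refine ⟨⟨zs, [], by simp, hzs, List.IsChain.nil⟩, ?_⟩
        intro y hy
        cases zs with
        | nil => simp at hy
        | cons z0 zt =>
            have hz0 : z0 ≤ b := hhd z0 rfl
            have : y ≤ z0 := pv_last_le_head_of_nonInc hzs hy
            omega
      · -- bs = bs' ++ [c]; then c = b and zs = as ++ bs'
        rw [← List.append_assoc] at heq
        obtain ⟨hzs, hc⟩ := List.append_inj' heq rfl
        have hcb : c = b := by simp at hc; omega
        rw [hcb] at hnd
        have hnd' := List.isChain_append.mp hnd
        refine ⟨⟨as, bs', hzs, hni, hnd'.1⟩, ?_⟩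
        intro y hy
        rcases bs'.eq_nil_or_concat' with rfl | ⟨bs'', d, rfl⟩
        · -- zs = as, non-increasing: last ≤ head ≤ b
          rw [List.append_nil] at hzs
          subst hzs
          cases zs with
          | nil => simp at hy
          | cons z0 zt =>
              have hz0 : z0 ≤ b := hhd z0 rfl
              have : y ≤ z0 := pv_last_le_head_of_nonInc hni hy
              omega
        · -- last of zs is last of bs'; the chain junction gives ≤ b
          have hylast : (bs'' ++ [d]).getLast? = some y := by
            rw [hzs] at hy
            simpa using hy
          have hdy : d = y := by simp at hylast; omega
          have hdb : d ≤ b := hnd'.2.2 d (by simp) b (by simp)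
          omega
    refine ⟨?_, key.1, ?_⟩
    · cases p with
      | none => rfl
      | some v =>
          have := (hcap v rfl).2 b (by simp)
          simp [pvLeInf, this]
    · intro v hv
      have hvb : v = b := by simp at hv; omega
      subst hvb
      exact ⟨hhd, key.2⟩
  · rintro ⟨hle, ⟨as, bs, rfl, hni, hnd⟩, hcap⟩
    constructor
    · refine ⟨as, bs ++ [b], by rw [List.append_assoc], hni, ?_⟩
      refine List.isChain_append.mpr ⟨hnd, by simp, ?_⟩
      intro x hx y hy
      have hyb : y = b := by simp at hy; omega
      have hx' : (as ++ bs).getLast? = some x := by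
        cases bs with
        | nil => simp at hx
        | cons b0 bt => rw [List.getLast?_append]; simp_all
      have := (hcap b rfl).2 x hx'
      omega
    · intro v hv
      rw [hv] at hle
      have hbv : b ≤ v := by
        simpa [pvLeInf] using hle
      constructor
      · intro x hx
        cases hab : (as ++ bs).head? with
        | none =>
            have : as ++ bs = [] := by simpa using hab
            rw [this] at hx
            have : b = x := by simpa using hx
            omega
        | some z =>
            have hz : z ≤ b := (hcap b rfl).1 z hab
            have : z = x := by
              rw [List.head?_append_of_ne_nil] at hx
              · rw [hab] at hx; simpa using hx
              · intro hnil; rw [hnil] at hab; simp at hab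
            omega
      · intro x hx
        have : b = x := by simpa using hx
        omega

-- prepending a new largest end (V2)
theorem pvValley_cons_iff {zs : List Int} {a b : Int} {p : Option Int}
    (hlast : zs.getLast? = some b) (hba : b < a) :
    (pvValley (a :: zs) ∧ pvCapOK (a :: zs) p) ↔
      (pvLeInf a p = true ∧ pvValley zs ∧ pvCapOK zs (some a)) := by
  have hzs_ne : zs ≠ [] := by intro h; rw [h] at hlast; simp at hlast
  constructor
  · rintro ⟨⟨as, bs, heq, hni, hnd⟩, hcap⟩
    have key : pvValley zs ∧ (∀ x, zs.head? = some x → x ≤ a) := by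
      cases as with
      | nil =>
          -- whole list non-decreasing: a ≤ last zs = b < a, absurd
          exfalso
          have hbs : bs = a :: zs := by simpa using heq.symm
          subst hbs
          have hl : (a :: zs).getLast? = some b := by
            cases zs with
            | nil => simp_all
            | cons z0 zt => simpa using hlast
          have : a ≤ b := pv_head_le_last_of_nonDec hnd hl
          omega
      | cons a' as' =>
          rw [List.cons_append] at heq
          injection heq with h1 hz
          subst h1
          refine ⟨⟨as', bs, hz, hni.of_cons, hnd⟩, ?_⟩
          intro x hx
          cases as' with
          | nil =>
              -- zs = bs non-decreasing: head ≤ last = b < a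
              rw [List.nil_append] at hz
              subst hz
              cases zs with
              | nil => simp at hx
              | cons z0 zt =>
                  have hz0 : z0 = x := by simpa using hx
                  subst hz0
                  have : z0 ≤ b := pv_head_le_last_of_nonDec hnd hlast
                  omega
          | cons c ct =>
              have hcx : c = x := by
                rw [hz] at hx; simpa using hx
              subst hcx
              exact (List.isChain_cons.mp hni).1 c (by simp)
    refine ⟨?_, key.1, ?_⟩
    · cases p with
      | none => rfl
      | some v =>
          have := (hcap v rfl).1 a rfl
          simp [pvLeInf, this]
    · intro v hv
      have hva : v = a := by simp at hv; omega
      subst hva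
      refine ⟨key.2, ?_⟩
      intro x hx
      rw [hlast] at hx
      have : b = x := by simpa using hx
      omega
  · rintro ⟨hle, ⟨as, bs, rfl, hni, hnd⟩, hcap⟩
    constructor
    · refine ⟨a :: as, bs, rfl, List.isChain_cons.mpr ⟨?_, hni⟩, hnd⟩
      intro y hy
      have hy' : (as ++ bs).head? = some y := by
        cases as with
        | nil => simp at hy
        | cons a0 t0 => simpa using hy
      exact (hcap a rfl).1 y hy'
    · intro v hv
      rw [hv] at hle
      have hav : a ≤ v := by simpa [pvLeInf] using hle
      constructor
      · intro x hx
        have : a = x := by simpa using hx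
        omega
      · intro x hx
        have hx' : (as ++ bs).getLast? = some x := by
          cases hab : as ++ bs with
          | nil => exact absurd hab hzs_ne
          | cons z0 zt =>
              rw [hab] at hx
              rw [List.getLast?_cons_cons] at hx
              exact hx
        rw [hlast] at hx'
        have : b = x := by simpa using hx'
        omega

-- ---- A-side characterization ----
theorem pvALoop_char (cubes : List Int) (l r : Int) (p : Option Int) :
    pvALoop cubes l r p = "Yes" ↔ (pvValley (pvSeg cubes l r) ∧ pvCapOK (pvSeg cubes l r) p) := by
  induction l, r, p using pvALoop.induct cubes with
  | case1 l r p hlr hab hbp ih =>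
      rw [pvALoop]
      simp only [dif_pos hlr, if_pos hab, if_pos hbp]
      have hhd : ∀ x, (pvSeg cubes l (r - 1)).head? = some x → x ≤ PySem.List.pyGetD cubes r 0 := by
        intro x hx
        by_cases h : l ≤ r - 1
        · rw [pvSeg_head? h] at hx
          have : PySem.List.pyGetD cubes l 0 = x := by simpa using hx
          omega
        · rw [pvSeg_nil (by omega)] at hx; simp at hx
      rw [pvSeg_concat hlr, pvValley_concat_iff hhd, ih]
      simp [hbp]
  | case2 l r p hlr hab hbp =>
      rw [pvALoop]
      simp only [dif_pos hlr, if_pos hab, if_neg hbp]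
      have hhd : ∀ x, (pvSeg cubes l (r - 1)).head? = some x → x ≤ PySem.List.pyGetD cubes r 0 := by
        intro x hx
        by_cases h : l ≤ r - 1
        · rw [pvSeg_head? h] at hx
          have : PySem.List.pyGetD cubes l 0 = x := by simpa using hx
          omega
        · rw [pvSeg_nil (by omega)] at hx; simp at hx
      rw [pvSeg_concat hlr, pvValley_concat_iff hhd]
      simp [hbp]
  | case3 l r p hlr hab hap ih =>
      rw [pvALoop]
      simp only [dif_pos hlr, if_neg hab, if_pos hap]
      have hlr' : l < r := by
        rcases lt_or_eq_of_le hlr with h | h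
        · exact h
        · exfalso; rw [h] at hab; omega
      have hlast : (pvSeg cubes (l + 1) r).getLast? = some (PySem.List.pyGetD cubes r 0) :=
        pvSeg_getLast? (by omega)
      rw [pvSeg_cons hlr, pvValley_cons_iff hlast (by omega), ih]
      simp [hap]
  | case4 l r p hlr hab hap =>
      rw [pvALoop]
      simp only [dif_pos hlr, if_neg hab, if_neg hap]
      have hlr' : l < r := by
        rcases lt_or_eq_of_le hlr with h | h
        · exact h
        · exfalso; rw [h] at hab; omega
      have hlast : (pvSeg cubes (l + 1) r).getLast? = some (PySem.List.pyGetD cubes r 0) :=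
        pvSeg_getLast? (by omega)
      rw [pvSeg_cons hlr, pvValley_cons_iff hlast (by omega)]
      simp [hap]
  | case5 l r p hlr =>
      rw [pvALoop]
      simp only [dif_neg hlr]
      rw [pvSeg_nil (by omega)]
      simp [pvValley_nil, pvCapOK]

theorem pvALoop_yes_or_no (cubes : List Int) (l r : Int) (p : Option Int) :
    pvALoop cubes l r p = "Yes" ∨ pvALoop cubes l r p = "No" := by
  induction l, r, p using pvALoop.induct cubes with
  | case1 l r p hlr hab hbp ih => rw [pvALoop]; simp only [dif_pos hlr, if_pos hab, if_pos hbp]; exact ih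
  | case2 l r p hlr hab hbp => rw [pvALoop]; simp [dif_pos hlr, if_pos hab, if_neg hbp]
  | case3 l r p hlr hab hap ih => rw [pvALoop]; simp only [dif_pos hlr, if_neg hab, if_pos hap]; exact ih
  | case4 l r p hlr hab hap => rw [pvALoop]; simp [dif_pos hlr, if_neg hab, if_neg hap]
  | case5 l r p hlr => rw [pvALoop]; simp [dif_neg hlr]

-- ---- B-side simulation ----
theorem pvBAsc_sim (cubes : List Int) (n i : Int) (h1 : 1 ≤ i) :
    (n ≤ pvBAsc cubes n i) ↔ pvNonDecL (pvSeg cubes (i - 1) (n - 1)) = true := by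
  revert h1
  induction i using pvBAsc.induct cubes n with
  | case1 i hc ih =>
      intro h1
      rw [pvBAsc]
      simp only [dif_pos hc]
      have ihh := ih (by omega)
      have e2 : i + 1 - 1 = i := by omega
      rw [e2] at ihh
      have ha : pvSeg cubes (i - 1) (n - 1) =
          PySem.List.pyGetD cubes (i - 1) 0 :: pvSeg cubes i (n - 1) := by
        have e3 : i - 1 + 1 = i := by omega
        rw [pvSeg_cons (show i - 1 ≤ n - 1 by omega), e3]
      have hb : pvSeg cubes i (n - 1) =
          PySem.List.pyGetD cubes i 0 :: pvSeg cubes (i + 1) (n - 1) :=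
        pvSeg_cons (by omega)
      rw [ihh, ha, hb]
      simp only [pvNonDecL, Bool.and_eq_true, decide_eq_true_eq]
      have := hc.2
      tauto
  | case2 i hc =>
      intro h1
      rw [pvBAsc]
      simp only [dif_neg hc]
      push Not at hc
      by_cases h2 : i < n
      · have hgt := hc h2
        have ha : pvSeg cubes (i - 1) (n - 1) =
            PySem.List.pyGetD cubes (i - 1) 0 ::
              (PySem.List.pyGetD cubes i 0 :: pvSeg cubes (i + 1) (n - 1)) := by
          have e3 : i - 1 + 1 = i := by omega
          rw [pvSeg_cons (show i - 1 ≤ n - 1 by omega), e3,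
            pvSeg_cons (show i ≤ n - 1 by omega)]
        rw [ha]
        simp only [pvNonDecL, Bool.and_eq_true, decide_eq_true_eq]
        constructor
        · intro h; omega
        · rintro ⟨h, -⟩; omega
      · have hone : pvNonDecL (pvSeg cubes (i - 1) (n - 1)) = true := by
          by_cases h3 : i - 1 ≤ n - 1
          · have h4 : i - 1 = n - 1 := by omega
            rw [h4, pvSeg_cons le_rfl, pvSeg_nil (by omega)]
            rfl
          · rw [pvSeg_nil (by omega)]; rfl
        rw [hone]
        simp only [iff_true]
        omega

theorem pvBDesc_sim (cubes : List Int) (n i : Int) (h1 : 1 ≤ i) :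
    (n ≤ pvBAsc cubes n (pvBDesc cubes n i)) ↔
      pvValleyL (pvSeg cubes (i - 1) (n - 1)) = true := by
  revert h1
  induction i using pvBDesc.induct cubes n with
  | case1 i hc ih =>
      intro h1
      rw [pvBDesc]
      simp only [dif_pos hc]
      have ihh := ih (by omega)
      have e2 : i + 1 - 1 = i := by omega
      rw [e2] at ihh
      have ha : pvSeg cubes (i - 1) (n - 1) =
          PySem.List.pyGetD cubes (i - 1) 0 :: pvSeg cubes i (n - 1) := by
        have e3 : i - 1 + 1 = i := by omega
        rw [pvSeg_cons (show i - 1 ≤ n - 1 by omega), e3]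
      have hb : pvSeg cubes i (n - 1) =
          PySem.List.pyGetD cubes i 0 :: pvSeg cubes (i + 1) (n - 1) :=
        pvSeg_cons (by omega)
      rw [ihh, ha, hb]
      simp only [pvValleyL, if_pos hc.2]
  | case2 i hc =>
      intro h1
      rw [pvBDesc]
      simp only [dif_neg hc]
      rw [pvBAsc_sim cubes n i h1]
      push Not at hc
      by_cases h2 : i < n
      · have hgt := hc h2
        have ha : pvSeg cubes (i - 1) (n - 1) =
            PySem.List.pyGetD cubes (i - 1) 0 ::
              (PySem.List.pyGetD cubes i 0 :: pvSeg cubes (i + 1) (n - 1)) := by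
          have e3 : i - 1 + 1 = i := by omega
          rw [pvSeg_cons (show i - 1 ≤ n - 1 by omega), e3,
            pvSeg_cons (show i ≤ n - 1 by omega)]
        rw [ha]
        simp only [pvValleyL,
          if_neg (show ¬ PySem.List.pyGetD cubes i 0 ≤ PySem.List.pyGetD cubes (i - 1) 0 by omega)]
      · by_cases h3 : i - 1 ≤ n - 1
        · have h4 : i - 1 = n - 1 := by omega
          rw [h4, pvSeg_cons le_rfl, pvSeg_nil (by omega)]
          simp [pvNonDecL, pvValleyL]
        · rw [pvSeg_nil (by omega)]
          simp [pvNonDecL, pvValleyL]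

-- ---- pure scan ↔ Prop ----
theorem pvNonDecL_iff (xs : List Int) : pvNonDecL xs = true ↔ pvNonDec xs := by
  induction xs using pvNonDecL.induct with
  | case1 => simp [pvNonDecL, pvNonDec]
  | case2 x => simp [pvNonDecL, pvNonDec]
  | case3 x y t ih =>
      simp only [pvNonDecL, Bool.and_eq_true, decide_eq_true_eq, ih]
      unfold pvNonDec
      rw [List.isChain_cons (l := y :: t)]
      simp

theorem pvValleyL_iff (xs : List Int) : pvValleyL xs = true ↔ pvValley xs := by
  induction xs using pvValleyL.induct with
  | case1 => simp [pvValleyL, pvValley_nil]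
  | case2 x =>
      simp only [pvValleyL, true_iff]
      exact ⟨[], [x], rfl, List.IsChain.nil, by simp⟩
  | case3 x y t hyx ih =>
      simp only [pvValleyL, if_pos hyx, ih]
      constructor
      · exact pvValley_cons_of_le hyx
      · exact pvValley_tail
  | case4 x y t hyx =>
      simp only [pvValleyL, if_neg hyx]
      rw [pvNonDecL_iff]
      constructor
      · exact pvValley_of_nonDec
      · rintro ⟨as, bs, heq, hni, hnd⟩
        cases as with
        | nil =>
            have hbs : bs = x :: y :: t := by simpa using heq.symm
            rw [hbs] at hnd
            exact hnd
        | cons a as' =>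
            cases as' with
            | nil =>
                obtain ⟨rfl, ht⟩ : a = x ∧ y :: t = bs := by constructor <;> simp_all
                unfold pvNonDec
                rw [List.isChain_cons]
                refine ⟨?_, by rw [ht]; exact hnd⟩
                intro z hz
                have : y = z := by simpa using hz
                omega
            | cons c ct =>
                exfalso
                obtain ⟨rfl, rfl, _⟩ : a = x ∧ c = y ∧ t = ct ++ bs := by
                  refine ⟨?_, ?_, ?_⟩ <;> simp_all
                exact hyx ((List.isChain_cons.mp hni).1 _ (by simp))

-- ---- per-case equality ----
theorem pv_case_eq (cubes : List Int) :
    pvALoop cubes 0 ((cubes.length : Int) - 1) none =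
      (if (cubes.length : Int) ≤ pvBAsc cubes (cubes.length : Int) (pvBDesc cubes (cubes.length : Int) 1) then "Yes" else "No") := by
  have hseg : pvSeg cubes 0 ((cubes.length : Int) - 1) = cubes := by
    unfold pvSeg
    have h1 : (cubes.length : Int) - 1 + 1 = (cubes.length : Int) := by omega
    rw [h1]
    exact PySem.List.map_pyGetD_pyRange_zero' cubes 0
  have hA := pvALoop_char cubes 0 ((cubes.length : Int) - 1) none
  rw [hseg] at hA
  have hB := pvBDesc_sim cubes (cubes.length : Int) 1 le_rfl
  have h0 : (1 : Int) - 1 = 0 := by omega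
  rw [h0, hseg, pvValleyL_iff] at hB
  by_cases hv : pvValley cubes
  · rw [if_pos (hB.mpr hv)]
    exact hA.mpr ⟨hv, by intro v hv'; simp at hv'⟩
  · rw [if_neg (fun h => hv (hB.mp h))]
    rcases pvALoop_yes_or_no cubes 0 ((cubes.length : Int) - 1) none with h | h
    · exact absurd (hA.mp h).1 hv
    · exact h

-- ===== VERDICT (by name: the statement is the Claim_ definition above) =====
theorem can_stack_cubes_spec : Claim_equal_can_stack_cubes := by
  intro tcs _
  unfold Spec_can_stack_cubes can_stack_cubes can_stack_cubes_alt
  simp only [pv_case_eq]
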